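-- pv_equiv track=rewrite | github.com/robert-d-schultz/Total-War-Modding-Scripts | Prefab bmd file to Terry layer file.py | parse_culture_mask
-- ===== SOURCE A (Python) =====
-- def parse_culture_mask(culture_mask):
--     #culture mask is 8 bytes that need to be read bit by bit
--
--     # Get the positions of the set bits (bits set to 1)
--     bit_index = next((i for i, bit in enumerate(bin(culture_mask)[:1:-1]) if bit == '1'), None)
--
--     return {
--         0: "",
--         6: "wh_dlc03_bst_beastmen",
--         7: "wh_main_brt_bretonnia",
--         8: "wh_main_chs_chaos",
--         9: "wh_main_dwf_dwarfs",
--         10: "wh_main_emp_empire",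
--         11: "wh_main_grn_greenskins",
--         12: "wh_main_vmp_vampire_counts",
--         13: "wh_dlc05_wef_wood_elves",
--         17: "wh2_main_def_dark_elves",
--         18: "wh2_main_hef_high_elves",
--         19: "wh2_main_lzd_lizardmen",
--         20: "wh2_main_skv_skaven",
--         21: "wh2_dlc09_tmb_tomb_kings",
--         22: "wh2_main_rogue",
--         23: "wh3_main_ksl_kislev",
--         24: "wh3_main_ogr_ogre_kingdoms",
--         25: "wh2_dlc11_cst_vampire_coast",
--         27: "wh3_main_kho_khorne",
--         28: "wh3_main_tze_tzeentch",
--         29: "wh3_main_nur_nurgle",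
--         30: "wh3_main_sla_slaanesh",
--         31: "wh3_main_dae_daemons",
--         32: "wh3_main_cth_cathay",
--         33: "wh_dlc08_nor_norsca",
--         34: "wh3_dlc23_chd_chaos_dwarfs"
--     }.get(bit_index, "")
-- ===== SOURCE B (Python) =====
-- _FACTIONS = {
--     0: "",
--     6: "wh_dlc03_bst_beastmen",
--     7: "wh_main_brt_bretonnia",
--     8: "wh_main_chs_chaos",
--     9: "wh_main_dwf_dwarfs",
--     10: "wh_main_emp_empire",
--     11: "wh_main_grn_greenskins",
--     12: "wh_main_vmp_vampire_counts",
--     13: "wh_dlc05_wef_wood_elves",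
--     17: "wh2_main_def_dark_elves",
--     18: "wh2_main_hef_high_elves",
--     19: "wh2_main_lzd_lizardmen",
--     20: "wh2_main_skv_skaven",
--     21: "wh2_dlc09_tmb_tomb_kings",
--     22: "wh2_main_rogue",
--     23: "wh3_main_ksl_kislev",
--     24: "wh3_main_ogr_ogre_kingdoms",
--     25: "wh2_dlc11_cst_vampire_coast",
--     27: "wh3_main_kho_khorne",
--     28: "wh3_main_tze_tzeentch",
--     29: "wh3_main_nur_nurgle",
--     30: "wh3_main_sla_slaanesh",
--     31: "wh3_main_dae_daemons",
--     32: "wh3_main_cth_cathay",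
--     33: "wh_dlc08_nor_norsca",
--     34: "wh3_dlc23_chd_chaos_dwarfs"
-- }
--
-- def parse_culture_mask(culture_mask):
--     # lowest set bit via the two's-complement idiom; 0 gives index -1, not in the table
--     idx = (culture_mask & -culture_mask).bit_length() - 1
--     return _FACTIONS.get(idx, "")
-- ===== Notes on version B (the rewrite author's own statement) =====
-- stated objective: idiomatic
-- what changed: B replaces A's build-a-binary-string-then-scan-it search for the lowest set bit (bin(), reversed slice, enumerate, next) by the arithmetic two's-complement idiom mask & -mask followed by bit_length, fed to the same table lookup.
import Mathlib
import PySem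

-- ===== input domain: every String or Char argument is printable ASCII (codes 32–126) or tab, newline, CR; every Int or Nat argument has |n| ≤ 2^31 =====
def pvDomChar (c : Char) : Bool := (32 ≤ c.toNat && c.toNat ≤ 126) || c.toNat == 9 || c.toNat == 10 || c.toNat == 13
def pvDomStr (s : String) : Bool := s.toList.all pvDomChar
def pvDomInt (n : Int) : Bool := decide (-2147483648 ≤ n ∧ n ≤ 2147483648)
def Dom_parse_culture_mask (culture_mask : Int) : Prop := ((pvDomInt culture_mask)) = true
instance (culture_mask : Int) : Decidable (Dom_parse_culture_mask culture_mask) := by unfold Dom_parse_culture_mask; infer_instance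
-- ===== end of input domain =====

-- B replaces A's reversed-binary-string scan for the lowest set bit by the arithmetic
-- idiom (n & -n).bit_length() - 1 with the same faction table (objective: idiomatic).

-- ===== PORT A =====
-- hand port of Python's bin(): msb-first binary digits of a natural number
def pyBinDigits : Nat → List Char
  | 0 => []
  | m + 1 => pyBinDigits ((m + 1) / 2) ++ [if (m + 1) % 2 = 1 then '1' else '0']
  decreasing_by omega

-- hand port of Python's bin(n) as a character list ("-0b…" / "0b…"; bin(0) = "0b0"); exact on all Int
def pyBin (n : Int) : List Char :=
  (if n < 0 then ['-', '0', 'b'] else ['0', 'b']) ++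
    (if n = 0 then ['0'] else pyBinDigits n.natAbs)

def factionTableA : PySem.Dict Int String := PySem.Dict.ofList
  [(0, ""), (6, "wh_dlc03_bst_beastmen"), (7, "wh_main_brt_bretonnia"),
   (8, "wh_main_chs_chaos"), (9, "wh_main_dwf_dwarfs"), (10, "wh_main_emp_empire"),
   (11, "wh_main_grn_greenskins"), (12, "wh_main_vmp_vampire_counts"),
   (13, "wh_dlc05_wef_wood_elves"), (17, "wh2_main_def_dark_elves"),
   (18, "wh2_main_hef_high_elves"), (19, "wh2_main_lzd_lizardmen"),
   (20, "wh2_main_skv_skaven"), (21, "wh2_dlc09_tmb_tomb_kings"),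
   (22, "wh2_main_rogue"), (23, "wh3_main_ksl_kislev"),
   (24, "wh3_main_ogr_ogre_kingdoms"), (25, "wh2_dlc11_cst_vampire_coast"),
   (27, "wh3_main_kho_khorne"), (28, "wh3_main_tze_tzeentch"),
   (29, "wh3_main_nur_nurgle"), (30, "wh3_main_sla_slaanesh"),
   (31, "wh3_main_dae_daemons"), (32, "wh3_main_cth_cathay"),
   (33, "wh_dlc08_nor_norsca"), (34, "wh3_dlc23_chd_chaos_dwarfs")]

def parse_culture_mask (culture_mask : Int) : String :=
  -- bin(culture_mask)[:1:-1] (step -1 ≠ 0, so slice? is always some; getD [] is never taken)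
  let s : List Char := (PySem.List.slice? (pyBin culture_mask) none (some 1) (-1)).getD []
  -- next((i for i, bit in enumerate(…) if bit == '1'), None)
  let bit_index : Option Int :=
    ((PySem.List.enumerate s 0).find? (fun p => p.2 == '1')).map (·.1)
  -- {…}.get(bit_index, ""): a None key is absent from the int-keyed dict
  match bit_index with
  | none => ""
  | some i => factionTableA.getD i ""

-- ===== PORT B =====
def factionTableB : PySem.Dict Int String := PySem.Dict.ofList
  [(0, ""), (6, "wh_dlc03_bst_beastmen"), (7, "wh_main_brt_bretonnia"),
   (8, "wh_main_chs_chaos"), (9, "wh_main_dwf_dwarfs"), (10, "wh_main_emp_empire"),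
   (11, "wh_main_grn_greenskins"), (12, "wh_main_vmp_vampire_counts"),
   (13, "wh_dlc05_wef_wood_elves"), (17, "wh2_main_def_dark_elves"),
   (18, "wh2_main_hef_high_elves"), (19, "wh2_main_lzd_lizardmen"),
   (20, "wh2_main_skv_skaven"), (21, "wh2_dlc09_tmb_tomb_kings"),
   (22, "wh2_main_rogue"), (23, "wh3_main_ksl_kislev"),
   (24, "wh3_main_ogr_ogre_kingdoms"), (25, "wh2_dlc11_cst_vampire_coast"),
   (27, "wh3_main_kho_khorne"), (28, "wh3_main_tze_tzeentch"),
   (29, "wh3_main_nur_nurgle"), (30, "wh3_main_sla_slaanesh"),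
   (31, "wh3_main_dae_daemons"), (32, "wh3_main_cth_cathay"),
   (33, "wh_dlc08_nor_norsca"), (34, "wh3_dlc23_chd_chaos_dwarfs")]

def parse_culture_mask_alt (culture_mask : Int) : String :=
  -- (culture_mask & -culture_mask).bit_length() - 1
  let idx : Int :=
    (PySem.Int.bitLength (PySem.Int.band culture_mask (-culture_mask)) : Int) - 1
  factionTableB.getD idx ""

-- ===== PRECONDITION & SPEC =====
def Spec_parse_culture_mask (culture_mask : Int) (out : String) : Prop := out = parse_culture_mask_alt culture_mask
instance (culture_mask : Int) (out : String) : Decidable (Spec_parse_culture_mask culture_mask out) := by unfold Spec_parse_culture_mask; infer_instance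

-- ===== CLAIM (what is proved, stated in full; the proofs are below) =====
def Claim_equal_parse_culture_mask : Prop := ∀ (culture_mask : Int), Dom_parse_culture_mask culture_mask → Spec_parse_culture_mask culture_mask (parse_culture_mask culture_mask)

-- ===== LEMMAS AND PROOFS =====

-- exponent of the lowest set bit (reference function for both sides)
def lowBitExp : Nat → Nat
  | 0 => 0
  | m + 1 => if (m + 1) % 2 = 1 then 0 else lowBitExp ((m + 1) / 2) + 1
  decreasing_by omega

-- lsb-first binary digits (reference form of A's reversed scan)
def lsbList : Nat → List Char
  | 0 => []
  | m + 1 => (if (m + 1) % 2 = 1 then '1' else '0') :: lsbList ((m + 1) / 2)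
  decreasing_by omega

theorem land_even_odd (a b : Nat) : (2*a) &&& (2*b+1) = 2*(a &&& b) := by
  apply Nat.eq_of_testBit_eq
  intro i
  rw [Nat.testBit_land]
  cases i with
  | zero => simp [Nat.testBit_zero]
  | succ j =>
    rw [Nat.testBit_succ, Nat.testBit_succ, Nat.testBit_succ,
        Nat.mul_div_cancel_left _ (by norm_num : 0 < 2),
        (by omega : (2*b+1)/2 = b),
        Nat.mul_div_cancel_left _ (by norm_num : 0 < 2), Nat.testBit_land]

theorem land_odd_even (a b : Nat) : (2*a+1) &&& (2*b) = 2*(a &&& b) := by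
  apply Nat.eq_of_testBit_eq
  intro i
  rw [Nat.testBit_land]
  cases i with
  | zero => simp [Nat.testBit_zero]
  | succ j =>
    rw [Nat.testBit_succ, Nat.testBit_succ, Nat.testBit_succ,
        (by omega : (2*a+1)/2 = a),
        Nat.mul_div_cancel_left _ (by norm_num : 0 < 2),
        Nat.mul_div_cancel_left _ (by norm_num : 0 < 2), Nat.testBit_land]

theorem land_self' (a : Nat) : a &&& a = a := by
  apply Nat.eq_of_testBit_eq
  intro i
  rw [Nat.testBit_land, Bool.and_self]

-- lowBitExp on even/odd arguments
theorem lowBitExp_odd (k : Nat) : lowBitExp (2*k+1) = 0 := by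
  rw [lowBitExp]
  simp

theorem lowBitExp_even (k : Nat) (h : 0 < k) : lowBitExp (2*k) = lowBitExp k + 1 := by
  obtain ⟨j, rfl⟩ : ∃ j, k = j + 1 := ⟨k - 1, by omega⟩
  rw [show 2*(j+1) = (2*j+1)+1 by ring, lowBitExp]
  rw [if_neg (by omega)]
  congr 2
  omega

-- m & (m-1) clears the lowest set bit, and that bit is at most m
theorem clear_lowbit : ∀ m : Nat, 0 < m →
    m &&& (m - 1) = m - 2 ^ lowBitExp m ∧ 2 ^ lowBitExp m ≤ m := by
  intro m
  induction m using Nat.strong_induction_on with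
  | _ m ih =>
    intro hm
    rcases Nat.even_or_odd m with he | ho
    · obtain ⟨k, hk⟩ := he
      have hk2 : m = 2 * k := by omega
      have hkpos : 0 < k := by omega
      obtain ⟨ih1, ih2⟩ := ih k (by omega) hkpos
      rw [hk2, (by omega : 2*k - 1 = 2*(k-1)+1), land_even_odd, ih1,
          lowBitExp_even k hkpos, pow_succ]
      constructor <;> omega
    · obtain ⟨k, rfl⟩ := ho
      rw [(by omega : 2*k+1 - 1 = 2*k), land_odd_even, land_self', lowBitExp_odd]
      simp

-- Python n & -n = 2 ^ (lowest set bit of |n|), for n ≠ 0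
theorem band_neg_self (n : Int) (hn : n ≠ 0) :
    PySem.Int.band n (-n) = ((2 ^ lowBitExp n.natAbs : Nat) : Int) := by
  have hpos : 0 < n.natAbs := by omega
  obtain ⟨h1, h2⟩ := clear_lowbit n.natAbs hpos
  rcases lt_trichotomy n 0 with h | h | h
  · have ha : ¬ 0 ≤ n := by omega
    have hb : (0:Int) ≤ -n := by omega
    simp only [PySem.Int.band, if_neg ha, if_pos hb]
    have e1 : (-n).toNat = n.natAbs := by omega
    have e2 : (-n - 1).toNat = n.natAbs - 1 := by omega
    rw [e1, e2, h1,
        Nat.sub_sub_self h2]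
  · exact absurd h hn
  · have ha : (0:Int) ≤ n := by omega
    have hb : ¬ (0:Int) ≤ -n := by omega
    simp only [PySem.Int.band, if_pos ha, if_neg hb]
    have e1 : n.toNat = n.natAbs := by omega
    have e2 : (- -n - 1).toNat = n.natAbs - 1 := by omega
    rw [e1, e2, h1,
        Nat.sub_sub_self h2]

theorem bitLength_two_pow (t : Nat) :
    PySem.Int.bitLength ((2 ^ t : Nat) : Int) = t + 1 := by
  set b := PySem.Int.bitLength ((2 ^ t : Nat) : Int) with hb
  have hne : ((2 ^ t : Nat) : Int) ≠ 0 := by positivity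
  have h1 := PySem.Int.two_pow_bitLength_le ((2 ^ t : Nat) : Int) hne
  have h2 := PySem.Int.lt_two_pow_bitLength ((2 ^ t : Nat) : Int)
  rw [Int.natAbs_natCast] at h1 h2
  rw [← hb] at h1 h2
  have hbt : t < b := (Nat.pow_lt_pow_iff_right (by norm_num)).mp h2
  have hb1 : b - 1 ≤ t := (Nat.pow_le_pow_iff_right (by norm_num)).mp h1
  omega

-- reversing A's msb-first digit build yields the lsb-first list
theorem rev_pyBinDigits : ∀ m : Nat, (pyBinDigits m).reverse = lsbList m := by
  intro m
  induction m using Nat.strong_induction_on with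
  | _ m ih =>
    match m with
    | 0 => simp [pyBinDigits, lsbList]
    | m + 1 =>
      rw [pyBinDigits, lsbList, List.reverse_append, List.reverse_singleton,
          List.singleton_append, ih ((m + 1) / 2) (by omega)]

-- the slice bin(n)[:1:-1] is reverse-after-dropping-two for any list
theorem slice_rev_drop2_aux {α : Type} (xs : List α) :
    ∀ c : Nat, c + 2 ≤ xs.length →
      List.filterMap (fun k : Nat => xs[((xs.length : Int) - 1 + -(k : Int)).toNat]?)
        (List.range c) = (xs.drop (xs.length - c)).reverse := by
  intro c
  induction c with
  | zero => intro _; simp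
  | succ c ihc =>
    intro hc
    rw [List.range_succ, List.filterMap_append, ihc (by omega)]
    have hidx : (((xs.length : Int) - 1 + -(c : Int))).toNat = xs.length - 1 - c := by omega
    have hlt : xs.length - 1 - c < xs.length := by omega
    rw [List.filterMap_cons]
    simp only [hidx, List.getElem?_eq_getElem hlt, List.filterMap_nil]
    have hdrop : xs.drop (xs.length - (c + 1)) =
        xs[xs.length - 1 - c] :: xs.drop (xs.length - c) := by
      rw [(by omega : xs.length - (c + 1) = xs.length - 1 - c),
          List.drop_eq_getElem_cons (by omega),
          (by omega : xs.length - 1 - c + 1 = xs.length - c)]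
    rw [hdrop, List.reverse_cons]

theorem slice_neg1_stop1 {α : Type} (xs : List α) (h3 : 3 ≤ xs.length) :
    PySem.List.slice? xs none (some 1) (-1) = some ((xs.drop 2).reverse) := by
  have hne : (-1 : Int) ≠ 0 := by norm_num
  have h3' : (3 : Int) ≤ (xs.length : Int) := by exact_mod_cast h3
  simp only [PySem.List.slice?, PySem.List.sliceIndices, if_neg hne]
  norm_num
  have hcnt : (if 2 < xs.length then
      ((xs.length : Int) - 1 - min 1 ((xs.length : Int) - 1)).toNat else 0) = xs.length - 2 := by
    rw [if_pos (by omega)]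
    omega
  rw [hcnt, slice_rev_drop2_aux xs (xs.length - 2) (by omega),
      (by omega : xs.length - (xs.length - 2) = 2)]

-- A's scan over the lsb-first digits finds exactly the lowest set bit index
theorem find_lsb : ∀ m : Nat, 0 < m → ∀ s : Int,
    (PySem.List.enumerate (lsbList m) s).find? (fun p => p.2 == '1') =
      some (s + (lowBitExp m : Int), '1') := by
  intro m
  induction m using Nat.strong_induction_on with
  | _ m ih =>
    intro hm s
    match m, hm with
    | m + 1, _ =>
      rw [lsbList, PySem.List.enumerate_cons, List.find?_cons]
      by_cases hodd : (m + 1) % 2 = 1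
      · rw [if_pos hodd]
        simp only [beq_self_eq_true]
        rw [lowBitExp, if_pos hodd]
        norm_num
      · rw [if_neg hodd]
        have : (('0' : Char) == '1') = false := by decide
        simp only [this]
        rw [ih ((m + 1) / 2) (by omega) (by omega) (s + 1), lowBitExp, if_neg hodd]
        push_cast
        ring_nf

-- keys equal ⇒ same table lookup (the two tables are definitionally equal)
theorem tables_eq : factionTableA = factionTableB := rfl

theorem main_pos_key (n : Int) (hn : n ≠ 0) :
    (PySem.Int.bitLength (PySem.Int.band n (-n)) : Int) - 1 = (lowBitExp n.natAbs : Int) := by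
  rw [band_neg_self n hn, bitLength_two_pow]
  push_cast
  ring

-- ===== VERDICT (by name: the statement is the Claim_ definition above) =====
theorem parse_culture_mask_spec : Claim_equal_parse_culture_mask := by
  unfold Claim_equal_parse_culture_mask
  intro n _
  unfold Spec_parse_culture_mask parse_culture_mask parse_culture_mask_alt
  by_cases h0 : n = 0
  · subst h0; decide
  · have hpos : 0 < n.natAbs := by omega
    -- digits are nonempty, so pyBin has length ≥ 3
    have hdig : lsbList n.natAbs ≠ [] := by
      match hpos' : n.natAbs, hpos with
      | m + 1, _ => rw [lsbList]; simp
    have hlen : 3 ≤ (pyBin n).length := by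
      unfold pyBin
      rw [if_neg h0]
      have : (pyBinDigits n.natAbs).length ≥ 1 := by
        have := rev_pyBinDigits n.natAbs
        rcases Nat.eq_zero_or_pos (pyBinDigits n.natAbs).length with hz | hp
        · exfalso
          apply hdig
          rw [← this, List.eq_nil_of_length_eq_zero hz]
          rfl
        · omega
      by_cases hneg : n < 0
      · simp [hneg]
      · simp [hneg]; omega
    rw [slice_neg1_stop1 _ hlen]
    simp only [Option.getD_some]
    have hdrop : ((pyBin n).drop 2).reverse =
        if n < 0 then lsbList n.natAbs ++ ['b'] else lsbList n.natAbs := by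
      unfold pyBin
      rw [if_neg h0]
      by_cases hneg : n < 0
      · rw [if_pos hneg, if_pos hneg]
        have : (['-', '0', 'b'] ++ pyBinDigits n.natAbs).drop 2 = 'b' :: pyBinDigits n.natAbs := rfl
        rw [this, List.reverse_cons, rev_pyBinDigits]
      · rw [if_neg hneg, if_neg hneg]
        have : (['0', 'b'] ++ pyBinDigits n.natAbs).drop 2 = pyBinDigits n.natAbs := rfl
        rw [this, rev_pyBinDigits]
    rw [hdrop]
    have hfound := find_lsb n.natAbs hpos 0
    by_cases hneg : n < 0
    · rw [if_pos hneg]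
      rw [PySem.List.enumerate_append, List.find?_append, hfound, tables_eq,
          ← main_pos_key n h0]
      simp
    · rw [if_neg hneg, hfound, tables_eq, ← main_pos_key n h0]
      simp
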